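-- pv_equiv track=rewrite | github.com/TengFeiyang01/Algorithm | bishi/8-19高盛OA/a.py | numberOfAlerts
-- ===== SOURCE A (Python) =====
-- def numberOfAlerts(precedingMinutes, alertThreshold, numCalls):
--     s = ans = 0
--     n = len(numCalls)
--     for i in range(n):
--         s += numCalls[i]
--         if i >= precedingMinutes:
--             s -= numCalls[i - precedingMinutes]
--         if i >= precedingMinutes - 1 and s > precedingMinutes * alertThreshold:
--             ans += 1
--     return ans
-- ===== SOURCE B (Python) =====
-- def numberOfAlerts(precedingMinutes, alertThreshold, numCalls):
--     n = len(numCalls)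
--     prefix = [0]
--     for x in numCalls:
--         prefix.append(prefix[-1] + x)
--     limit = precedingMinutes * alertThreshold
--     ans = 0
--     for i in range(n - precedingMinutes + 1):
--         if prefix[i + precedingMinutes] - prefix[i] > limit:
--             ans += 1
--     return ans
-- ===== Notes on version B (the rewrite author's own statement) =====
-- stated objective: alternative
-- what changed: Replaces the incremental running-window sum (add the entering element, subtract the leaving one each step) with a prefix-sum table built once and a separate loop over window start indices reading each window sum as a difference of two table entries.
-- outside the precondition, e.g. on numberOfAlerts(-1, 0, []): A returns 0, B raises IndexError
import Mathlib
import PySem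

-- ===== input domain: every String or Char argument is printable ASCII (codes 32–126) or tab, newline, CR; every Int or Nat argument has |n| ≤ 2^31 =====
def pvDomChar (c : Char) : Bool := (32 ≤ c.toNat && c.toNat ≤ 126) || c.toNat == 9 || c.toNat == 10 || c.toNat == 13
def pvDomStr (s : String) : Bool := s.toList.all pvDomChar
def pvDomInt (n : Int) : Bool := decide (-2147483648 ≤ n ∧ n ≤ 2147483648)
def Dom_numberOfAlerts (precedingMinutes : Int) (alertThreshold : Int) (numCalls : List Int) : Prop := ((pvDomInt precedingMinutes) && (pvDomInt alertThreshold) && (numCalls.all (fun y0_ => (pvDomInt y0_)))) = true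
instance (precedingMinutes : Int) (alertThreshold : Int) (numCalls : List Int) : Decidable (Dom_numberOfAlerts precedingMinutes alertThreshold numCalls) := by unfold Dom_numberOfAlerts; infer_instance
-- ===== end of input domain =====

-- B replaces A's incremental sliding-window running sum with a prefix-sum table built once
-- and a loop over window start indices (objective: alternative decomposition, same cost).


-- ===== PORT A =====
def numberOfAlerts (precedingMinutes : Int) (alertThreshold : Int) (numCalls : List Int) : Int :=
  let n : Int := numCalls.length
  let r := (PySem.List.pyRange 0 n 1).foldl (fun (st : Int × Int) i =>
      let s := st.1 + PySem.List.pyGetD numCalls i 0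
      let s := if precedingMinutes ≤ i then s - PySem.List.pyGetD numCalls (i - precedingMinutes) 0 else s
      let ans := if precedingMinutes - 1 ≤ i ∧ precedingMinutes * alertThreshold < s then st.2 + 1 else st.2
      (s, ans)) (0, 0)
  r.2

-- ===== PORT B =====
-- prefix.append(prefix[-1] + x) is ported with pyGetD acc (-1) 0 for prefix[-1] (exact: the
-- accumulator is never empty, so Python's negative index always hits the last element).
def numberOfAlerts_alt (precedingMinutes : Int) (alertThreshold : Int) (numCalls : List Int) : Int :=
  let n : Int := numCalls.length
  let pfx := numCalls.foldl (fun acc x => acc ++ [PySem.List.pyGetD acc (-1) 0 + x]) ([0] : List Int)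
  let limit := precedingMinutes * alertThreshold
  (PySem.List.pyRange 0 (n - precedingMinutes + 1) 1).foldl (fun ans i =>
      if limit < PySem.List.pyGetD pfx (i + precedingMinutes) 0 - PySem.List.pyGetD pfx i 0 then ans + 1
      else ans) 0

-- ===== PRECONDITION & SPEC =====
-- Pre_ excludes negative precedingMinutes: there A raises IndexError on every nonempty list
-- (numCalls[i - precedingMinutes] runs past the end), leaving only the degenerate empty-list
-- corner where A returns 0 while B's negative window bounds raise; window counting is only
-- meaningful for a nonnegative window length.
def Pre_numberOfAlerts (precedingMinutes : Int) (_alertThreshold : Int) (_numCalls : List Int) : Prop :=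
  0 ≤ precedingMinutes
instance (precedingMinutes : Int) (alertThreshold : Int) (numCalls : List Int) : Decidable (Pre_numberOfAlerts precedingMinutes alertThreshold numCalls) := by unfold Pre_numberOfAlerts; infer_instance
def pvWitness_numberOfAlerts : Int × Int × List Int := (2, 1, [3, 0, 5, 1])

def Spec_numberOfAlerts (precedingMinutes : Int) (alertThreshold : Int) (numCalls : List Int) (out : Int) : Prop := out = numberOfAlerts_alt precedingMinutes alertThreshold numCalls
instance (precedingMinutes : Int) (alertThreshold : Int) (numCalls : List Int) (out : Int) : Decidable (Spec_numberOfAlerts precedingMinutes alertThreshold numCalls out) := by unfold Spec_numberOfAlerts; infer_instance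

-- ===== CLAIM (what is proved, stated in full; the proofs are below) =====
def Claim_equal_numberOfAlerts : Prop := ∀ (precedingMinutes : Int) (alertThreshold : Int) (numCalls : List Int), Dom_numberOfAlerts precedingMinutes alertThreshold numCalls → Pre_numberOfAlerts precedingMinutes alertThreshold numCalls → Spec_numberOfAlerts precedingMinutes alertThreshold numCalls (numberOfAlerts precedingMinutes alertThreshold numCalls)

-- ===== LEMMAS AND PROOFS =====

-- pvS nc k = sum of the first k elements of nc
def pvS (nc : List Int) (k : Nat) : Int := (nc.take k).sum

lemma pvS_succ (nc : List Int) (k : Nat) (hk : k < nc.length) :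
    pvS nc (k + 1) = pvS nc k + nc.getD k 0 := by
  unfold pvS
  rw [List.sum_take_succ nc k hk]
  simp [List.getD, List.getElem?_eq_getElem hk]

-- the table B builds is the table of all prefix sums
lemma prefix_eq (nc : List Int) :
    nc.foldl (fun acc x => acc ++ [PySem.List.pyGetD acc (-1) 0 + x]) ([0] : List Int)
      = (List.range (nc.length + 1)).map (pvS nc) := by
  induction nc using List.reverseRecOn with
  | nil => simp [pvS]
  | append_singleton l x ih =>
    rw [List.foldl_append, ih]
    have hlast : PySem.List.pyGetD ((List.range (l.length + 1)).map (pvS l)) (-1) 0 = pvS l l.length := by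
      rw [List.range_succ, List.map_append]
      simp [PySem.List.pyGetD_neg_one_append_singleton]
    simp only [List.foldl_cons, List.foldl_nil, hlast]
    rw [List.length_append, List.length_singleton, List.range_succ (n := l.length + 1), List.map_append]
    congr 1
    · apply List.map_congr_left
      intro k hk
      have hk' : k ≤ l.length := by
        have := List.mem_range.mp hk; omega
      simp [pvS, List.take_append_of_le_length hk']
    · simp [pvS]

-- A's loop invariant: after j iterations s is the sum of the last min(j, pm) elements seen,
-- and ans counts the qualifying window end positions below j
lemma foldA (pm at' : Int) (nc : List Int) (hpm : 0 ≤ pm) (j : Nat) (hj : j ≤ nc.length) :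
    (PySem.List.pyRange 0 (j : Int) 1).foldl (fun (st : Int × Int) i =>
      let s := st.1 + PySem.List.pyGetD nc i 0
      let s := if pm ≤ i then s - PySem.List.pyGetD nc (i - pm) 0 else s
      let ans := if pm - 1 ≤ i ∧ pm * at' < s then st.2 + 1 else st.2
      (s, ans)) (0, 0)
    = (pvS nc j - pvS nc (j - pm.toNat),
       (List.countP (fun i : Nat =>
          decide (pm - 1 ≤ (i : Int) ∧ pm * at' < pvS nc (i+1) - pvS nc (i+1 - pm.toNat)))
          (List.range j) : Int)) := by
  induction j with
  | zero => simp [pvS]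
  | succ j ih =>
    have hj' : j ≤ nc.length := by omega
    have hcast : ((j + 1 : Nat) : Int) = (j : Int) + 1 := by push_cast; ring
    rw [hcast, PySem.List.pyRange_one_succ_right (by positivity), List.foldl_append, ih hj']
    simp only [List.foldl_cons, List.foldl_nil]
    have hget : PySem.List.pyGetD nc (j : Int) 0 = nc.getD j 0 := by
      simp [PySem.List.pyGetD_natCast]
    have hS1 : pvS nc (j + 1) = pvS nc j + nc.getD j 0 := pvS_succ nc j (by omega)
    by_cases hge : pm ≤ (j : Int)
    · have hm : pm.toNat ≤ j := by omega
      have hidx : (j : Int) - pm = ((j - pm.toNat : Nat) : Int) := by omega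
      have hget2 : PySem.List.pyGetD nc ((j : Int) - pm) 0 = nc.getD (j - pm.toNat) 0 := by
        rw [hidx]; simp [PySem.List.pyGetD_natCast]
      have hS2 : pvS nc (j - pm.toNat + 1) = pvS nc (j - pm.toNat) + nc.getD (j - pm.toNat) 0 :=
        pvS_succ nc _ (by omega)
      have hsub1 : j + 1 - pm.toNat = j - pm.toNat + 1 := by omega
      have hnew : pvS nc j - pvS nc (j - pm.toNat) + nc.getD j 0 - nc.getD (j - pm.toNat) 0
          = pvS nc (j + 1) - pvS nc (j + 1 - pm.toNat) := by
        rw [hsub1, hS1, hS2]; ring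
      simp only [hget, hget2, if_pos hge, hnew]
      rw [List.range_succ, List.countP_append]
      simp only [List.countP_cons, List.countP_nil, Nat.cast_add, Nat.zero_add]
      split_ifs with hc hd hd
      · push_cast; simp
      · exact absurd (by simpa using hc) (by simpa using hd)
      · exact absurd (by simpa using hd) (by simpa using hc)
      · push_cast; simp
    · have hm : j < pm.toNat := by omega
      have hz1 : j - pm.toNat = 0 := by omega
      have hz2 : j + 1 - pm.toNat = 0 := by omega
      have hnew : pvS nc j - pvS nc (j - pm.toNat) + nc.getD j 0
          = pvS nc (j + 1) - pvS nc (j + 1 - pm.toNat) := by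
        rw [hz1, hz2, hS1]; ring
      simp only [hget, if_neg hge, hnew]
      rw [List.range_succ, List.countP_append]
      simp only [List.countP_cons, List.countP_nil, Nat.cast_add, Nat.zero_add]
      split_ifs with hc hd hd
      · push_cast; simp
      · exact absurd (by simpa using hc) (by simpa using hd)
      · exact absurd (by simpa using hd) (by simpa using hc)
      · push_cast; simp

-- counting qualifying windows by end index (A) equals counting them by start index (B)
lemma count_eq (pm at' : Int) (nc : List Int) (hpm : 0 ≤ pm) :
    (List.countP (fun i : Nat =>
        decide (pm - 1 ≤ (i : Int) ∧ pm * at' < pvS nc (i+1) - pvS nc (i+1 - pm.toNat)))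
        (List.range nc.length))
    = (List.countP (fun k : Nat =>
        decide (pm * at' < pvS nc (k + pm.toNat) - pvS nc k))
        (List.range ((nc.length : Int) - pm + 1).toNat)) := by
  by_cases h0 : pm = 0
  · rw [List.countP_eq_zero.mpr, List.countP_eq_zero.mpr]
    · intro k _; simp [h0]
    · intro i _; simp [h0]
  · have hm1 : 1 ≤ pm.toNat := by omega
    by_cases hmn : pm.toNat - 1 ≤ nc.length
    · have htoNat : ((nc.length : Int) - pm + 1).toNat = nc.length - (pm.toNat - 1) := by omega
      rw [htoNat]
      rw [show List.range nc.length
            = List.range (pm.toNat - 1)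
              ++ (List.range (nc.length - (pm.toNat - 1))).map (fun x => (pm.toNat - 1) + x) from by
          rw [← List.range_add]; congr 1; omega]
      rw [List.countP_append, List.countP_map]
      rw [List.countP_eq_zero.mpr, Nat.zero_add]
      · apply List.countP_congr
        intro k _
        have e1 : pm.toNat - 1 + k + 1 = k + pm.toNat := by omega
        have e2 : k + pm.toNat - pm.toNat = k := by omega
        have e3 : pm - 1 ≤ ((pm.toNat - 1 + k : Nat) : Int) := by omega
        simp only [Function.comp, e1, e2, decide_eq_true_eq]
        exact ⟨fun h => h.2, fun h => ⟨e3, h⟩⟩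
      · intro i hi
        have hi' : i < pm.toNat - 1 := List.mem_range.mp hi
        simp only [decide_eq_true_eq, not_and]
        intro hle; exfalso; omega
    · have htoNat : ((nc.length : Int) - pm + 1).toNat = 0 := by omega
      rw [htoNat]
      simp only [List.range_zero, List.countP_nil]
      rw [List.countP_eq_zero.mpr]
      intro i hi
      have hi' : i < nc.length := List.mem_range.mp hi
      simp only [decide_eq_true_eq, not_and]
      intro hle; exfalso; omega

theorem numberOfAlerts_eq_alt (pm at' : Int) (nc : List Int) (hpm : 0 ≤ pm) :
    numberOfAlerts pm at' nc = numberOfAlerts_alt pm at' nc := by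
  unfold numberOfAlerts numberOfAlerts_alt
  simp only [prefix_eq]
  rw [foldA pm at' nc hpm nc.length le_rfl]
  have hB := PySem.List.foldl_count_if
      (fun i => decide (pm * at' < PySem.List.pyGetD ((List.range (nc.length + 1)).map (pvS nc)) (i + pm) 0
        - PySem.List.pyGetD ((List.range (nc.length + 1)).map (pvS nc)) i 0))
      (PySem.List.pyRange 0 ((nc.length : Int) - pm + 1) 1) 0
  simp only [decide_eq_true_eq] at hB
  rw [hB]
  rw [count_eq pm at' nc hpm]
  rw [PySem.List.pyRange_one, List.countP_map]
  norm_num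
  apply List.countP_congr
  intro k hk
  have hk' : k < ((nc.length : Int) - pm + 1).toNat := List.mem_range.mp hk
  have h1 : (k : Int) + pm = ((k + pm.toNat : Nat) : Int) := by push_cast; omega
  have h2 : PySem.List.pyGetD ((List.range (nc.length + 1)).map (pvS nc)) ((k : Int) + pm) 0
      = pvS nc (k + pm.toNat) := by
    rw [h1, PySem.List.pyGetD_natCast, PySem.List.getD_map_range _ _ _ _ (by omega)]
  have h3 : PySem.List.pyGetD ((List.range (nc.length + 1)).map (pvS nc)) ((k : Int)) 0
      = pvS nc k := by
    rw [PySem.List.pyGetD_natCast, PySem.List.getD_map_range _ _ _ _ (by omega)]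
  simp only [Function.comp, h2, h3, decide_eq_true_eq]

-- ===== VERDICT (by name: the statement is the Claim_ definition above) =====
theorem numberOfAlerts_spec : Claim_equal_numberOfAlerts := by
  intro pm at' nc _ hpre
  exact numberOfAlerts_eq_alt pm at' nc hpre
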